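-- pv_equiv track=rewrite | github.com/Fakiri-ismail/Python-challenge | Sum_challenge.py | findSubarrays
-- ===== SOURCE A (Python) =====
-- def findSubarrays(nums) -> bool:
--         def target_exist(num_list, target):
--             for i in range(len(num_list)-1):
--                 if num_list[i] + num_list[i + 1] == target:
--                     return True
--             return False
--
--         for i in range(len(nums) - 1):
--             if target_exist(nums[i+1:], nums[i] + nums[i+1]):
--                 return True
--         return False
-- ===== SOURCE B (Python) =====
-- def findSubarrays(nums) -> bool:
--     seen = set()
--     for a, b in zip(nums, nums[1:]):
--         s = a + b
--         if s in seen: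
--             return True
--         seen.add(s)
--     return False
-- ===== Notes on version B (the rewrite author's own statement) =====
-- stated objective: faster
-- what changed: Replaces the quadratic nested scan (for each adjacent pair, rescan the suffix for an equal adjacent sum) with a single pass that stores each adjacent sum in a set and returns True on the first repeat.
import Mathlib
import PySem

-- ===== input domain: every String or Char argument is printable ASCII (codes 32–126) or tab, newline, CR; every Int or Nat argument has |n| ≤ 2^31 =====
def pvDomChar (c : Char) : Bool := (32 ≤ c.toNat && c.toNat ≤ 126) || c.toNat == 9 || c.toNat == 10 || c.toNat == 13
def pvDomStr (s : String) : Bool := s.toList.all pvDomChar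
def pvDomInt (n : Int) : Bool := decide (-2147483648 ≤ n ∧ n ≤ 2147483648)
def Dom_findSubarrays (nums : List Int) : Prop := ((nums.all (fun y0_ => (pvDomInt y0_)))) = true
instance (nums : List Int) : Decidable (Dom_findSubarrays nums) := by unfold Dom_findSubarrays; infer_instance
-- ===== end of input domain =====

-- B replaces A's quadratic rescan of the suffix with a single pass over the adjacent
-- sums, stored in a set, returning true on the first repeated sum (objective: faster).

-- ===== PORT A =====
-- inner helper target_exist: scans adjacent pairs of num_list for one summing to target
-- (indices are always in range here, so getD is exact for num_list[i])
def targetExist (numList : List Int) (target : Int) : Bool :=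
  (List.range (numList.length - 1)).any
    (fun i => numList.getD i 0 + numList.getD (i + 1) 0 == target)

def findSubarrays (nums : List Int) : Bool :=
  (List.range (nums.length - 1)).any
    (fun i => targetExist (nums.drop (i + 1)) (nums.getD i 0 + nums.getD (i + 1) 0))

-- ===== PORT B =====
-- the loop 'for a, b in zip(nums, nums[1:])' with early return, seen as a set
def altLoop (seen : PySem.Set Int) : List (Int × Int) → Bool
  | [] => false
  | p :: rest =>
      let s := p.1 + p.2
      if PySem.Set.contains seen s then true
      else altLoop (PySem.Set.add seen s) rest

def findSubarrays_alt (nums : List Int) : Bool :=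
  altLoop PySem.Set.empty (nums.zip (nums.drop 1))

-- ===== PRECONDITION & SPEC =====
def Spec_findSubarrays (nums : List Int) (out : Bool) : Prop := out = findSubarrays_alt nums
instance (nums : List Int) (out : Bool) : Decidable (Spec_findSubarrays nums out) := by unfold Spec_findSubarrays; infer_instance

-- ===== CLAIM (what is proved, stated in full; the proofs are below) =====
def Claim_equal_findSubarrays : Prop := ∀ (nums : List Int), Dom_findSubarrays nums → Spec_findSubarrays nums (findSubarrays nums)

-- ===== LEMMAS AND PROOFS =====

-- the list of adjacent sums
def adjSums (nums : List Int) : List Int :=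
  (nums.zip (nums.drop 1)).map (fun p => p.1 + p.2)

theorem altLoop_iff (ps : List (Int × Int)) (seen : PySem.Set Int) :
    altLoop seen ps = true ↔
      (∃ p ∈ ps, p.1 + p.2 ∈ seen) ∨ ¬ (ps.map (fun p => p.1 + p.2)).Nodup := by
  induction ps generalizing seen with
  | nil => simp [altLoop]
  | cons p ps ih =>
      simp only [altLoop, List.map_cons, List.nodup_cons]
      by_cases h : (p.1 + p.2) ∈ seen
      · rw [if_pos ((PySem.Set.contains_iff _ _).mpr h)]
        exact iff_of_true rfl (Or.inl ⟨p, List.mem_cons_self .., h⟩)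
      · have hc : ¬ PySem.Set.contains seen (p.1 + p.2) = true := by
          simp [h]
        rw [if_neg hc, ih]
        constructor
        · rintro (⟨q, hq, hmem⟩ | hnd)
          · rcases (PySem.Set.mem_add seen (p.1 + p.2) (q.1 + q.2)).mp hmem with h' | h'
            · exact Or.inl ⟨q, List.mem_cons_of_mem _ hq, h'⟩
            · exact Or.inr (fun hx => hx.1 (h' ▸ List.mem_map_of_mem hq))
          · exact Or.inr (fun hx => hnd hx.2)
        · rintro (⟨q, hq, hmem⟩ | hnd)
          · rcases List.mem_cons.mp hq with rfl | hq'
            · exact absurd hmem h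
            · exact Or.inl ⟨q, hq', (PySem.Set.mem_add seen _ _).mpr (Or.inl hmem)⟩
          · by_cases hni : (p.1 + p.2) ∈ ps.map (fun q => q.1 + q.2)
            · rcases List.mem_map.mp hni with ⟨q, hq, hs⟩
              exact Or.inl ⟨q, hq, (PySem.Set.mem_add seen _ _).mpr (Or.inr hs)⟩
            · exact Or.inr (fun hnd' => hnd ⟨hni, hnd'⟩)

theorem alt_iff (nums : List Int) :
    findSubarrays_alt nums = true ↔ ¬ (adjSums nums).Nodup := by
  rw [findSubarrays_alt, altLoop_iff, adjSums]
  simp [PySem.Set.empty]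

theorem length_adjSums (nums : List Int) :
    (adjSums nums).length = nums.length - 1 := by
  rw [adjSums, List.length_map, List.length_zip, List.length_drop]
  omega

theorem getElem?_adjSums (nums : List Int) (j : ℕ) (hj : j < nums.length - 1) :
    (adjSums nums)[j]? = some (nums.getD j 0 + nums.getD (j + 1) 0) := by
  have h1 : j < nums.length := by omega
  have h2 : j + 1 < nums.length := by omega
  have hj' : j < (adjSums nums).length := by rw [length_adjSums]; exact hj
  rw [List.getElem?_eq_getElem hj']
  simp only [adjSums, List.getElem_map, List.getElem_zip, List.getD_eq_getElem?_getD,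
    List.getElem?_eq_getElem h1, List.getElem?_eq_getElem h2, List.getElem_drop,
    Option.getD_some]
  simp [Nat.add_comm]

-- common characterisation: a repeated adjacent sum at positions i < j
theorem dup_iff (nums : List Int) :
    ¬ (adjSums nums).Nodup ↔
      ∃ i j, i < j ∧ j < nums.length - 1 ∧
        nums.getD i 0 + nums.getD (i + 1) 0 = nums.getD j 0 + nums.getD (j + 1) 0 := by
  rw [List.nodup_iff_getElem?_ne_getElem?]
  push Not
  constructor
  · rintro ⟨i, j, hij, hj, heq⟩
    rw [length_adjSums] at hj
    refine ⟨i, j, hij, hj, ?_⟩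
    have hi : i < nums.length - 1 := by omega
    rw [getElem?_adjSums _ _ hi, getElem?_adjSums _ _ hj] at heq
    exact Option.some_injective _ heq
  · rintro ⟨i, j, hij, hj, heq⟩
    refine ⟨i, j, hij, by rw [length_adjSums]; exact hj, ?_⟩
    have hi : i < nums.length - 1 := by omega
    rw [getElem?_adjSums _ _ hi, getElem?_adjSums _ _ hj, heq]

theorem a_iff (nums : List Int) :
    findSubarrays nums = true ↔
      ∃ i j, i < j ∧ j < nums.length - 1 ∧
        nums.getD i 0 + nums.getD (i + 1) 0 = nums.getD j 0 + nums.getD (j + 1) 0 := by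
  simp only [findSubarrays, targetExist, List.any_eq_true, List.mem_range, beq_iff_eq]
  constructor
  · rintro ⟨i, hi, k, hk, heq⟩
    rw [List.length_drop] at hk
    refine ⟨i, i + 1 + k, by omega, by omega, ?_⟩
    have h1 : i + 1 + k < nums.length := by omega
    have h2 : i + 1 + (k + 1) < nums.length := by omega
    rw [List.getD_eq_getElem?_getD, List.getD_eq_getElem?_getD, List.getElem?_drop,
      List.getElem?_drop, List.getElem?_eq_getElem h1, List.getElem?_eq_getElem h2] at heq
    rw [List.getD_eq_getElem _ _ h1, List.getD_eq_getElem (n := i + 1 + k + 1) _ _ (by omega)]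
    simpa [show i + 1 + (k + 1) = i + 1 + k + 1 by omega] using heq.symm
  · rintro ⟨i, j, hij, hj, heq⟩
    refine ⟨i, by omega, j - i - 1, ?_, ?_⟩
    · rw [List.length_drop]; omega
    · have h1 : i + 1 + (j - i - 1) = j := by omega
      have h2 : j < nums.length := by omega
      have h3 : j + 1 < nums.length := by omega
      rw [List.getD_eq_getElem?_getD, List.getD_eq_getElem?_getD, List.getElem?_drop,
        List.getElem?_drop, h1, show i + 1 + (j - i - 1 + 1) = j + 1 by omega,
        List.getElem?_eq_getElem h2, List.getElem?_eq_getElem h3,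
        List.getD_eq_getElem _ _ h2, List.getD_eq_getElem _ _ h3] at *
      exact heq.symm

-- ===== VERDICT (by name: the statement is the Claim_ definition above) =====
theorem findSubarrays_spec : Claim_equal_findSubarrays := by
  intro nums _
  unfold Spec_findSubarrays
  rw [Bool.eq_iff_iff, a_iff, alt_iff, dup_iff]
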